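-- pv_equiv track=rewrite | github.com/springroll35/Python_PTIT | PY01041 - SO TANG GIAM.py | check
-- ===== SOURCE A (Python) =====
-- def check(n):
--     if len(n) < 3:
--         return False
--     cnt = 0
--     for i in range(1, len(n) - 1):
--         ok = True
--         for j in range(0, i):
--             if n[j] >= n[j+1]:
--                 ok = False
--         for j in range(len(n) - 1, i, -1):
--             if n[j] >= n[j-1]:
--                 ok = False
--         if ok == True:
--             cnt += 1
--     if cnt == 0:
--         return False
--     return True
-- ===== SOURCE B (Python) =====
-- def _down(prev, rest):
--     for x in rest:
--         if x >= prev: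
--             return False
--         prev = x
--     return True
--
--
-- def _up(prev, rest):
--     if not rest:
--         return False  # still climbing at the end: no descent
--     x = rest[0]
--     if prev < x:
--         return _up(x, rest[1:])
--     return _down(prev, rest)
--
--
-- def check(n):
--     if len(n) < 2 or n[0] >= n[1]:
--         return False
--     return _up(n[1], n[2:])
-- ===== Notes on version B (the rewrite author's own statement) =====
-- stated objective: faster
-- what changed: Replaces the O(n^2) scan that re-validates the whole prefix and suffix for every candidate peak with a single linear walk: climb the strictly increasing prefix, then require a strictly decreasing remainder.
import Mathlib
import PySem

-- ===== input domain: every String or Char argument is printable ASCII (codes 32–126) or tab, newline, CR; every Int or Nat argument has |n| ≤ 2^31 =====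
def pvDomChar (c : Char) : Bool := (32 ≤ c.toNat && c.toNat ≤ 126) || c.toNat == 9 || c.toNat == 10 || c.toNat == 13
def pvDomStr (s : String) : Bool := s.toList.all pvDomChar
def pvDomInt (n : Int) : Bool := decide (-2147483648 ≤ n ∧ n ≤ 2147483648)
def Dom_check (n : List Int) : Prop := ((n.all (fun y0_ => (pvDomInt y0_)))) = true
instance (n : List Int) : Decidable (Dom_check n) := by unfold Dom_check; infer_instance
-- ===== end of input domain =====

-- B replaces A's quadratic per-candidate rescans with a single linear climb-then-descend walk.

-- ===== PORT A =====
-- literal transliteration of Source A: for each interior i, re-scan the whole prefix and suffix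
def check (n : List Int) : Bool :=
  if (PySem.List.len n) < 3 then false
  else
    let cnt : Int := (PySem.List.pyRange 1 (PySem.List.len n - 1) 1).foldl
      (fun cnt i =>
        let ok : Bool := (PySem.List.pyRange 0 i 1).foldl
          (fun ok j => if PySem.List.pyGetD n j 0 ≥ PySem.List.pyGetD n (j + 1) 0 then false else ok)
          true
        let ok : Bool := (PySem.List.pyRange (PySem.List.len n - 1) i (-1)).foldl
          (fun ok j => if PySem.List.pyGetD n j 0 ≥ PySem.List.pyGetD n (j - 1) 0 then false else ok)
          ok
        if ok = true then cnt + 1 else cnt)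
      0
    if cnt = 0 then false else true

-- ===== PORT B =====
-- _down(prev, rest): the remainder must be strictly decreasing below prev
def pvDown : Int → List Int → Bool
  | _, [] => true
  | prev, x :: rest => if x ≥ prev then false else pvDown x rest

-- _up(prev, rest): consume the strictly increasing part; at the first non-increase demand a strict descent to the end
def pvUp : Int → List Int → Bool
  | _, [] => false
  | prev, x :: rest => if prev < x then pvUp x rest else pvDown prev (x :: rest)

def check_alt (n : List Int) : Bool :=
  if PySem.List.len n < 2 then false
  else if PySem.List.pyGetD n 0 0 ≥ PySem.List.pyGetD n 1 0 then false
  else pvUp (PySem.List.pyGetD n 1 0) (PySem.List.slice n (some 2) none)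

-- ===== PRECONDITION & SPEC =====
def Spec_check (n : List Int) (out : Bool) : Prop := out = check_alt n
instance (n : List Int) (out : Bool) : Decidable (Spec_check n out) := by unfold Spec_check; infer_instance

-- ===== CLAIM (what is proved, stated in full; the proofs are below) =====
def Claim_equal_check : Prop := ∀ (n : List Int), Dom_check n → Spec_check n (check n)

-- ===== LEMMAS AND PROOFS =====

-- the common characterisation both ports are reduced to: a strict mountain with an interior peak
def Mountain (n : List Int) : Prop :=
  ∃ u x v, n = u ++ x :: v ∧ u ≠ [] ∧ v ≠ [] ∧
    List.IsChain (· < ·) (u ++ [x]) ∧ List.IsChain (· > ·) (x :: v)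

-- what A's nested index loops literally compute
def IntForm (n : List Int) : Prop :=
  3 ≤ (n.length : Int) ∧ ∃ i : Int,
    (1 ≤ i ∧ i < (n.length : Int) - 1) ∧
    (∀ j : Int, 0 ≤ j → j < i → PySem.List.pyGetD n j 0 < PySem.List.pyGetD n (j + 1) 0) ∧
    (∀ j : Int, i < j → j ≤ (n.length : Int) - 1 → PySem.List.pyGetD n j 0 < PySem.List.pyGetD n (j - 1) 0)

-- flag fold with a Prop test (PySem's foldl_if_false_eq takes a Bool test, A's port tests a Prop)
lemma foldl_ite_false (p : Int → Prop) [DecidablePred p] (l : List Int) (b : Bool) :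
    l.foldl (fun ok j => if p j then false else ok) b = (b && !l.any fun j => decide (p j)) := by
  induction l generalizing b with
  | nil => simp
  | cons x t ih => simp only [List.foldl_cons, List.any_cons, ih]; by_cases h : p x <;> simp [h]

lemma check_iff' (n : List Int) : check n = true ↔ IntForm n := by
  unfold check IntForm
  by_cases hlen : (PySem.List.len n) < 3
  · simp only [if_pos hlen, Bool.false_eq_true, false_iff]
    simp only [PySem.List.len_eq] at hlen
    intro hc; omega
  · rw [if_neg hlen]
    simp only [foldl_ite_false, PySem.List.foldl_ite_add_one, zero_add]
    simp only [PySem.List.len_eq] at hlen ⊢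
    have h3 : 3 ≤ (n.length : Int) := by omega
    simp only [h3, true_and]
    have hp : ∀ i : Int,
        (((true && !((PySem.List.pyRange 0 i).any fun j => decide (PySem.List.pyGetD n j 0 ≥ PySem.List.pyGetD n (j + 1) 0))) &&
          !((PySem.List.pyRange ((n.length : Int) - 1) i (-1)).any fun j => decide (PySem.List.pyGetD n j 0 ≥ PySem.List.pyGetD n (j - 1) 0))) = true) ↔
        ((∀ j : Int, 0 ≤ j → j < i → PySem.List.pyGetD n j 0 < PySem.List.pyGetD n (j + 1) 0) ∧
         (∀ j : Int, i < j → j ≤ (n.length : Int) - 1 → PySem.List.pyGetD n j 0 < PySem.List.pyGetD n (j - 1) 0)) := by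
      intro i
      simp only [Bool.true_and, Bool.and_eq_true, Bool.not_eq_true', List.any_eq_false,
        PySem.List.mem_pyRange_one, PySem.List.mem_pyRange_neg_one,
        ge_iff_le, and_imp, decide_eq_true_eq, not_le]
    split_ifs with h
    · rw [Int.natCast_eq_zero, List.countP_eq_zero] at h
      simp only [false_iff]
      rintro ⟨i, hi, h1, h2⟩
      exact h i (PySem.List.mem_pyRange_one.mpr hi)
        (by simp only [decide_eq_true_eq]; exact (hp i).mpr ⟨h1, h2⟩)
    · simp only [true_iff]
      rw [Int.natCast_eq_zero] at h
      obtain ⟨i, hmem, hpi⟩ := List.countP_pos_iff.mp (Nat.pos_of_ne_zero h)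
      simp only [decide_eq_true_eq] at hpi
      exact ⟨i, PySem.List.mem_pyRange_one.mp hmem, (hp i).mp hpi⟩

lemma intform_iff_mountain (n : List Int) : IntForm n ↔ Mountain n := by
  constructor
  · rintro ⟨h3, i, ⟨hi1, hi2⟩, h1, h2⟩
    lift i to ℕ using (by omega)
    have hk1 : 1 ≤ i := by exact_mod_cast hi1
    have hk2 : i + 1 < n.length := by omega
    have hkl : i < n.length := by omega
    refine ⟨n.take i, n[i], n.drop (i + 1), ?_, ?_, ?_, ?_, ?_⟩
    · rw [List.getElem_cons_drop, List.take_append_drop]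
    · exact List.ne_nil_of_length_pos (by simp; omega)
    · exact List.ne_nil_of_length_pos (by simp; omega)
    · have htake : n.take i ++ [n[i]] = n.take (i + 1) := by
        rw [List.take_add_one, List.getElem?_eq_getElem hkl]
        rfl
      rw [htake, List.isChain_iff_getElem]
      intro j hj
      simp only [List.length_take] at hj
      rw [List.getElem_take, List.getElem_take]
      have := h1 (j : Int) (by positivity) (by exact_mod_cast (by omega : j < i))
      rw [PySem.List.pyGetD_eq_getElem n 0 (by positivity) (by exact_mod_cast (by omega : j < n.length)),
          show ((j : Int) + 1) = ((j + 1 : ℕ) : Int) by push_cast; ring,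
          PySem.List.pyGetD_eq_getElem n 0 (by positivity) (by exact_mod_cast (by omega : j + 1 < n.length))] at this
      simpa using this
    · have hdrop : n[i] :: n.drop (i + 1) = n.drop i := List.getElem_cons_drop hkl
      rw [hdrop, List.isChain_iff_getElem]
      intro j hj
      simp only [List.length_drop] at hj
      rw [List.getElem_drop, List.getElem_drop]
      have := h2 ((i + j + 1 : ℕ) : Int) (by push_cast; omega) (by push_cast; omega)
      rw [PySem.List.pyGetD_eq_getElem n 0 (by positivity) (by exact_mod_cast (by omega : i + j + 1 < n.length)),
          show (((i + j + 1 : ℕ) : Int) - 1) = ((i + j : ℕ) : Int) by push_cast; ring,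
          PySem.List.pyGetD_eq_getElem n 0 (by positivity) (by exact_mod_cast (by omega : i + j < n.length))] at this
      simp only [Int.toNat_natCast] at this
      simp only [← Nat.add_assoc]
      exact this
  · rintro ⟨u, x, v, heq, hu, hv, hup, hdown⟩
    have hul : 1 ≤ u.length := List.length_pos_iff.mpr hu
    have hvl : 1 ≤ v.length := List.length_pos_iff.mpr hv
    have hnl : n.length = u.length + v.length + 1 := by
      rw [heq]; simp; omega
    have hn2 : n = (u ++ [x]) ++ v := by rw [heq]; simp
    have hdropu : n.drop u.length = x :: v := by rw [heq, List.drop_left]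
    refine ⟨by exact_mod_cast (by omega : (3 : ℕ) ≤ n.length), (u.length : Int),
      ⟨by exact_mod_cast hul, by omega⟩, ?_, ?_⟩
    · intro j hj0 hji
      lift j to ℕ using hj0
      have hjn : j < u.length := by exact_mod_cast hji
      rw [PySem.List.pyGetD_eq_getElem n 0 (by positivity) (by exact_mod_cast (by omega : j < n.length)),
          show ((j : Int) + 1) = ((j + 1 : ℕ) : Int) by push_cast; ring,
          PySem.List.pyGetD_eq_getElem n 0 (by positivity) (by exact_mod_cast (by omega : j + 1 < n.length))]
      simp only [Int.toNat_natCast]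
      have hc := List.isChain_iff_getElem.mp hup j (by simp; omega)
      have g1 : n[j]'(by omega) = (u ++ [x])[j]'(by simp; omega) := by
        rw [List.getElem_of_eq hn2, List.getElem_append_left (by simp; omega)]
      have g2 : n[j+1]'(by omega) = (u ++ [x])[j+1]'(by simp; omega) := by
        rw [List.getElem_of_eq hn2, List.getElem_append_left (by simp; omega)]
      rw [g1, g2]
      exact hc
    · intro j hji hjl
      lift j to ℕ using (by omega)
      have hjn1 : u.length < j := by exact_mod_cast hji
      have hjn2 : j ≤ n.length - 1 := by
        have : (j : Int) ≤ (n.length : Int) - 1 := hjl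
        omega
      rw [PySem.List.pyGetD_eq_getElem n 0 (by positivity) (by exact_mod_cast (by omega : j < n.length)),
          show ((j : Int) - 1) = ((j - 1 : ℕ) : Int) by push_cast [Nat.cast_sub (by omega : 1 ≤ j)]; ring,
          PySem.List.pyGetD_eq_getElem n 0 (by positivity) (by exact_mod_cast (by omega : j - 1 < n.length))]
      simp only [Int.toNat_natCast]
      have hc := List.isChain_iff_getElem.mp (hdropu ▸ hdown) (j - 1 - u.length)
        (by simp [List.length_drop]; omega)
      rw [List.getElem_drop, List.getElem_drop] at hc
      rw [gt_iff_lt] at hc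
      convert hc using 2 <;> omega

lemma check_iff (n : List Int) : check n = true ↔ Mountain n :=
  (check_iff' n).trans (intform_iff_mountain n)

lemma down_iff (prev : Int) (l : List Int) :
    pvDown prev l = true ↔ List.IsChain (· > ·) (prev :: l) := by
  induction l generalizing prev with
  | nil => simp [pvDown]
  | cons x rest ih =>
    rw [List.isChain_cons_cons]
    simp only [pvDown]
    by_cases h : x ≥ prev
    · simp only [if_pos h, Bool.false_eq_true, false_iff]
      intro hc; omega
    · rw [if_neg h, ih]
      have hx : prev > x := by omega
      simp [hx]

lemma up_iff (prev : Int) (l : List Int) :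
    pvUp prev l = true ↔ ∃ u x v, prev :: l = u ++ x :: v ∧ v ≠ [] ∧
      List.IsChain (· < ·) (u ++ [x]) ∧ List.IsChain (· > ·) (x :: v) := by
  induction l generalizing prev with
  | nil =>
    simp only [pvUp, Bool.false_eq_true, false_iff]
    rintro ⟨u, x, v, heq, hv, -, -⟩
    have hlen := congrArg List.length heq
    rcases v with _ | ⟨b, v⟩
    · exact hv rfl
    · simp at hlen; omega
  | cons x0 rest ih =>
    simp only [pvUp]
    by_cases h : prev < x0
    · rw [if_pos h, ih]
      constructor
      · rintro ⟨u, x, v, heq, hv, hup, hdown⟩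
        refine ⟨prev :: u, x, v, by rw [List.cons_append, heq], hv, ?_, hdown⟩
        rw [List.cons_append, List.isChain_cons]
        refine ⟨?_, hup⟩
        intro b hb
        rcases u with _ | ⟨a, u⟩
        · simp at heq hb; omega
        · simp at heq hb; omega
      · rintro ⟨u, x, v, heq, hv, hup, hdown⟩
        rcases u with _ | ⟨a, u⟩
        · simp only [List.nil_append, List.cons.injEq] at heq
          obtain ⟨rfl, rfl⟩ := heq
          rw [List.isChain_cons_cons] at hdown
          omega
        · simp only [List.cons_append, List.cons.injEq] at heq
          obtain ⟨rfl, heq⟩ := heq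
          refine ⟨u, x, v, heq, hv, ?_, hdown⟩
          rw [List.cons_append, List.isChain_cons] at hup
          exact hup.2
    · rw [if_neg h, down_iff]
      constructor
      · intro hd
        exact ⟨[], prev, x0 :: rest, rfl, List.cons_ne_nil _ _, by simp, hd⟩
      · rintro ⟨u, x, v, heq, hv, hup, hdown⟩
        rcases u with _ | ⟨a, u⟩
        · simp only [List.nil_append, List.cons.injEq] at heq
          obtain ⟨rfl, rfl⟩ := heq
          exact hdown
        · exfalso
          simp only [List.cons_append, List.cons.injEq] at heq
          obtain ⟨rfl, heq⟩ := heq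
          rw [List.cons_append, List.isChain_cons] at hup
          have hb := hup.1
          rcases u with _ | ⟨c, u⟩
          · simp at heq hb; omega
          · simp at heq hb; omega

lemma check_alt_iff (n : List Int) : check_alt n = true ↔ Mountain n := by
  match n with
  | [] =>
    simp only [check_alt, Mountain]
    norm_num
    intro u x v h1 h2
    exact absurd h2 (List.cons_ne_nil _ _)
  | [a] =>
    simp only [check_alt, Mountain]
    norm_num
    intro u x v h hu hv
    exfalso
    rcases v with _ | ⟨w, v⟩
    · exact hv rfl
    · have := congrArg List.length h
      simp only [List.length_cons, List.length_nil, List.length_append] at this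
      omega
  | a :: b :: rest =>
    have hlen : ¬ PySem.List.len (a :: b :: rest) < 2 := by simp
    have h0 : PySem.List.pyGetD (a :: b :: rest) 0 0 = a := by simp [pysem]
    have h1 : PySem.List.pyGetD (a :: b :: rest) 1 0 = b := by
      simp [PySem.List.pyGetD, PySem.List.pyGet?, PySem.List.pyIdx?]
    have hslice : PySem.List.slice (a :: b :: rest) (some 2) none = rest := by
      rw [PySem.List.slice_some_none]
      simp [PySem.List.clampIdx]
    rw [check_alt, if_neg hlen, h0, h1, hslice]
    by_cases hab : a ≥ b
    · rw [if_pos hab]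
      simp only [Bool.false_eq_true, false_iff]
      rintro ⟨u, x, v, heq, hu, hv, hup, hdown⟩
      rcases u with _ | ⟨c, u⟩
      · exact hu rfl
      · simp only [List.cons_append, List.cons.injEq] at heq
        obtain ⟨rfl, heq⟩ := heq
        rw [List.cons_append, List.isChain_cons] at hup
        have hb := hup.1
        rcases u with _ | ⟨d, u⟩
        · simp at heq hb; omega
        · simp at heq hb; omega
    · rw [if_neg hab, up_iff]
      constructor
      · rintro ⟨u, x, v, heq, hv, hup, hdown⟩
        refine ⟨a :: u, x, v, by rw [List.cons_append, heq], List.cons_ne_nil _ _, hv, ?_, hdown⟩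
        rw [List.cons_append, List.isChain_cons]
        refine ⟨?_, hup⟩
        intro c hc
        rcases u with _ | ⟨d, u⟩
        · simp at heq hc; omega
        · simp at heq hc; omega
      · rintro ⟨u, x, v, heq, hu, hv, hup, hdown⟩
        rcases u with _ | ⟨c, u⟩
        · exact absurd rfl hu
        · simp only [List.cons_append, List.cons.injEq] at heq
          obtain ⟨rfl, heq⟩ := heq
          rw [List.cons_append, List.isChain_cons] at hup
          exact ⟨u, x, v, heq, hv, hup.2, hdown⟩

-- ===== VERDICT (by name: the statement is the Claim_ definition above) =====
theorem check_spec : Claim_equal_check := by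
  intro n _
  unfold Spec_check
  exact Bool.coe_iff_coe.mp ((check_iff n).trans (check_alt_iff n).symm)
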